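-- pv_equiv track=rewrite | github.com/iamdmitryvolkov/neuromodel | not_a_model_data_processing_pks.py | find_pack
-- ===== SOURCE A (Python) =====
-- WINDOW_SIZE = 7
--
-- PACK_START_ACTIVITY = 30 # 137
--
-- PACK_END_ACTIVITY = 15 # 36
--
-- def find_pack(data, start_index):
--     accumulator = 0
--     if len(data) - WINDOW_SIZE > start_index:
--         for i in range(WINDOW_SIZE):
--             accumulator += sum(data[start_index + i])
--     else:
--         return None
--     if accumulator >= PACK_START_ACTIVITY:
--         pack = True
--         pack_start = start_index
--     else:
--         pack = False
--     for i in range(start_index, len(data) - WINDOW_SIZE):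
--         accumulator += (sum(data[i+WINDOW_SIZE]) - sum(data[i]))
--         if not pack:
--             if accumulator >= PACK_START_ACTIVITY:
--                 pack = True
--                 pack_start = i+1
--         else:
--             if accumulator <= PACK_END_ACTIVITY:
--                 return pack_start, (i+1)
--     if pack:
--         return pack_start, len(data)
--     else:
--         return None
-- ===== SOURCE B (Python) =====
-- WINDOW_SIZE = 7
--
-- PACK_START_ACTIVITY = 30
--
-- PACK_END_ACTIVITY = 15
--
-- def find_pack(data, start_index):
--     n = len(data)
--     if n - WINDOW_SIZE <= start_index:
--         return None
--     rowsum = [sum(row) for row in data]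
--     acc = 0
--     for i in range(WINDOW_SIZE):
--         acc += rowsum[start_index + i]
--     window_sums = [acc]
--     for i in range(start_index, n - WINDOW_SIZE):
--         acc += rowsum[i + WINDOW_SIZE] - rowsum[i]
--         window_sums.append(acc)
--     j0 = next((j for j, w in enumerate(window_sums) if w >= PACK_START_ACTIVITY), None)
--     if j0 is None:
--         return None
--     for j in range(j0 + 1, len(window_sums)):
--         if window_sums[j] <= PACK_END_ACTIVITY:
--             return start_index + j0, start_index + j
--     return start_index + j0, n
-- ===== Notes on version B (the rewrite author's own statement) =====
-- stated objective: alternative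
-- what changed: B precomputes per-row sums once, materialises the full list of window sums by the same incremental add/subtract recurrence, and then finds the answer by two plain searches over that list (first window >= 30, then first later window <= 15), instead of A's single stateful loop with a pack flag and early return.
import Mathlib
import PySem

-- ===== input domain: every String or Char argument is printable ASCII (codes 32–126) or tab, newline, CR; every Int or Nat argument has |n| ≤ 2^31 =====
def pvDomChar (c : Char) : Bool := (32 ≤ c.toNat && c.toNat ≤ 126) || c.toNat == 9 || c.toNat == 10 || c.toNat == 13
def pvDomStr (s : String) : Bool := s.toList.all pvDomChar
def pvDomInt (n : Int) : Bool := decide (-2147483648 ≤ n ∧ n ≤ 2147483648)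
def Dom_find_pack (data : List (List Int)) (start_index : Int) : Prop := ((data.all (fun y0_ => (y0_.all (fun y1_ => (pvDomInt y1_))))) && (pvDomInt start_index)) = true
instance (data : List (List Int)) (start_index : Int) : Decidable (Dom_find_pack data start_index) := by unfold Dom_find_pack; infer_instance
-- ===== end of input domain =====

-- B replaces A's stateful pack-flag loop by materialising the list of window sums (same
-- incremental recurrence) and two plain searches over it; objective: alternative decomposition.


-- ===== PORT A =====
-- sum(row): Python's left-fold sum
def rowSum (r : List Int) : Int := r.foldl (· + ·) 0

-- sum(data[i]) with Python indexing; default [] only reached outside Pre_ (where Python raises)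
def sumAt (data : List (List Int)) (i : Int) : Int := rowSum (PySem.List.pyGetD data i [])

-- state: (accumulator, pack, pack_start, early-return result)
def packStep (data : List (List Int)) (s : Int × Bool × Int × Option (Int × Int)) (i : Int) :
    Int × Bool × Int × Option (Int × Int) :=
  match s with
  | (acc, pack, ps, res) =>
    if res.isSome then s
    else
      let acc' := acc + (sumAt data (i + 7) - sumAt data i)
      if !pack then
        if acc' ≥ 30 then (acc', true, i + 1, none) else (acc', false, ps, none)
      else
        if acc' ≤ 15 then (acc', pack, ps, some (ps, i + 1)) else (acc', pack, ps, none)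

def find_pack (data : List (List Int)) (start_index : Int) : Option (Int × Int) :=
  if (data.length : Int) - 7 > start_index then
    let accumulator :=
      (PySem.List.pyRange 0 7 1).foldl (fun a i => a + sumAt data (start_index + i)) 0
    let init : Bool × Int :=
      if accumulator ≥ 30 then (true, start_index) else (false, 0)  -- 0 = unset pack_start
    let fin :=
      (PySem.List.pyRange start_index ((data.length : Int) - 7) 1).foldl
        (packStep data) (accumulator, init.1, init.2, none)
    match fin with
    | (_, pack, ps, res) =>
      match res with
      | some r => some r
      | none => if pack then some (ps, (data.length : Int)) else none
  else none

-- ===== PORT B =====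
def find_pack_alt (data : List (List Int)) (start_index : Int) : Option (Int × Int) :=
  let n : Int := data.length
  if n - 7 ≤ start_index then none
  else
    let rowsum := data.map rowSum
    let acc0 :=
      (PySem.List.pyRange 0 7 1).foldl
        (fun a i => a + PySem.List.pyGetD rowsum (start_index + i) 0) 0
    let built :=
      (PySem.List.pyRange start_index (n - 7) 1).foldl
        (fun (p : Int × List Int) i =>
          let acc := p.1 + (PySem.List.pyGetD rowsum (i + 7) 0 - PySem.List.pyGetD rowsum i 0)
          (acc, p.2 ++ [acc]))
        (acc0, [acc0])
    let window_sums := built.2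
    match window_sums.findIdx? (fun w => w ≥ 30) with
    | none => none
    | some j0 =>
      match (window_sums.drop (j0 + 1)).findIdx? (fun w => w ≤ 15) with
      | none => some (start_index + (j0 : Int), n)
      | some k => some (start_index + (j0 : Int), start_index + (j0 : Int) + 1 + (k : Int))

-- ===== PRECONDITION & SPEC =====
-- Pre_ excludes exactly the inputs where Python A raises IndexError: the guard passes but
-- start_index is below -len(data), so data[start_index] is out of range.
def Pre_find_pack (data : List (List Int)) (start_index : Int) : Prop :=
  (data.length : Int) - 7 > start_index → -(data.length : Int) ≤ start_index
instance (data : List (List Int)) (start_index : Int) : Decidable (Pre_find_pack data start_index) := by unfold Pre_find_pack; infer_instance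

def pvWitness_find_pack : List (List Int) × Int :=
  ([[5], [5], [5], [5], [5], [5], [5], [0]], 0)

def Spec_find_pack (data : List (List Int)) (start_index : Int) (out : Option (Int × Int)) : Prop := out = find_pack_alt data start_index
instance (data : List (List Int)) (start_index : Int) (out : Option (Int × Int)) : Decidable (Spec_find_pack data start_index out) := by unfold Spec_find_pack; infer_instance

-- ===== CLAIM (what is proved, stated in full; the proofs are below) =====
def Claim_equal_find_pack : Prop := ∀ (data : List (List Int)) (start_index : Int), Dom_find_pack data start_index → Pre_find_pack data start_index → Spec_find_pack data start_index (find_pack data start_index)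

-- ===== LEMMAS AND PROOFS =====

-- the incremental change when the window advances past row i
def pvDelta (data : List (List Int)) (i : Int) : Int := sumAt data (i + 7) - sumAt data i

-- the successive accumulator values of A's main loop (= B's window_sums tail)
def pvScan (data : List (List Int)) : List Int → Int → List Int
  | [], _ => []
  | i :: t, acc => (acc + pvDelta data i) :: pvScan data t (acc + pvDelta data i)

-- A's loop once pack is open: first index whose window sum drops to ≤ 15, as i+1
def pvEnd (data : List (List Int)) : List Int → Int → Option Int
  | [], _ => none
  | i :: t, acc =>
    if acc + pvDelta data i ≤ 15 then some (i + 1) else pvEnd data t (acc + pvDelta data i)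

-- A's loop while pack is closed: first index opening the pack, with the later end search
def pvStart (data : List (List Int)) : List Int → Int → Option (Int × Option Int)
  | [], _ => none
  | i :: t, acc =>
    if acc + pvDelta data i ≥ 30 then some (i + 1, pvEnd data t (acc + pvDelta data i))
    else pvStart data t (acc + pvDelta data i)

-- A's post-loop extraction
def pvFinish (st : Int × Bool × Int × Option (Int × Int)) (n : Int) : Option (Int × Int) :=
  match st.2.2.2 with
  | some r => some r
  | none => if st.2.1 then some (st.2.2.1, n) else none

theorem packStep_some (data : List (List Int)) (acc : Int) (pk : Bool) (ps : Int)
    (r : Int × Int) (i : Int) : packStep data (acc, pk, ps, some r) i = (acc, pk, ps, some r) := rfl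

theorem packStep_true (data : List (List Int)) (acc ps i : Int) :
    packStep data (acc, true, ps, none) i =
      if acc + pvDelta data i ≤ 15 then (acc + pvDelta data i, true, ps, some (ps, i + 1))
      else (acc + pvDelta data i, true, ps, none) := rfl

theorem packStep_false (data : List (List Int)) (acc ps i : Int) :
    packStep data (acc, false, ps, none) i =
      if acc + pvDelta data i ≥ 30 then (acc + pvDelta data i, true, i + 1, none)
      else (acc + pvDelta data i, false, ps, none) := by
  simp only [packStep, pvDelta]
  norm_num

theorem foldl_packStep_some (data : List (List Int)) (l : List Int) (acc : Int) (pk : Bool)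
    (ps : Int) (r : Int × Int) :
    l.foldl (packStep data) (acc, pk, ps, some r) = (acc, pk, ps, some r) := by
  induction l with
  | nil => rfl
  | cons i t ih => rw [List.foldl_cons, packStep_some, ih]

theorem foldl_packStep_true (data : List (List Int)) (l : List Int) (acc ps n : Int) :
    pvFinish (l.foldl (packStep data) (acc, true, ps, none)) n =
      (match pvEnd data l acc with
       | some e => some (ps, e)
       | none => some (ps, n)) := by
  induction l generalizing acc with
  | nil => rfl
  | cons i t ih =>
    rw [List.foldl_cons, packStep_true]
    by_cases h : acc + pvDelta data i ≤ 15
    · rw [if_pos h, foldl_packStep_some]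
      simp [pvFinish, pvEnd, h]
    · rw [if_neg h, ih]
      simp [pvEnd, h]

theorem foldl_packStep_false (data : List (List Int)) (l : List Int) (acc ps0 n : Int) :
    pvFinish (l.foldl (packStep data) (acc, false, ps0, none)) n =
      (match pvStart data l acc with
       | none => none
       | some (ps, some e) => some (ps, e)
       | some (ps, none) => some (ps, n)) := by
  induction l generalizing acc with
  | nil => rfl
  | cons i t ih =>
    rw [List.foldl_cons, packStep_false]
    by_cases h : acc + pvDelta data i ≥ 30
    · rw [if_pos h, foldl_packStep_true]
      simp only [pvStart, if_pos h]
      cases pvEnd data t (acc + pvDelta data i) <;> rfl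
    · rw [if_neg h, ih]
      simp [pvStart, h]

theorem foldl_build (data : List (List Int)) (l : List Int) (acc : Int) (ws0 : List Int) :
    (l.foldl
      (fun (p : Int × List Int) i => (p.1 + pvDelta data i, p.2 ++ [p.1 + pvDelta data i]))
      (acc, ws0)).2 = ws0 ++ pvScan data l acc := by
  induction l generalizing acc ws0 with
  | nil => simp [pvScan]
  | cons i t ih => simp [List.foldl_cons, ih, pvScan]

theorem pvEnd_findIdx_aux (data : List (List Int)) (m : Nat) :
    ∀ (a acc : Int),
      pvEnd data (PySem.List.pyRange a (a + m) 1) acc =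
        (List.findIdx? (fun w => w ≤ 15)
            (pvScan data (PySem.List.pyRange a (a + m) 1) acc)).map
          (fun (k : Nat) => a + (k : Int) + 1) := by
  induction m with
  | zero =>
    intro a acc
    rw [PySem.List.pyRange_one_eq_nil (by omega : a + ((0:Nat):Int) ≤ a)]
    rfl
  | succ m ih =>
    intro a acc
    rw [PySem.List.pyRange_one_cons (by push_cast; omega : a < a + ((m + 1 : Nat) : Int))]
    have ht : a + ((m + 1 : Nat) : Int) = (a + 1) + (m : Nat) := by push_cast; omega
    rw [ht]
    simp only [pvEnd, pvScan, List.findIdx?_cons, decide_eq_true_eq]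
    by_cases h : acc + pvDelta data a ≤ 15
    · simp [h]
    · rw [if_neg h, if_neg h, ih (a + 1), Option.map_map]
      cases hF : List.findIdx? (fun w => w ≤ 15)
          (pvScan data (PySem.List.pyRange (a + 1) (a + 1 + (m : Nat)) 1)
            (acc + pvDelta data a)) with
      | none => rfl
      | some k =>
        simp only [Option.map_some, Option.some.injEq, Function.comp_apply]
        push_cast; omega

theorem pvEnd_findIdx (data : List (List Int)) (a b acc : Int) :
    pvEnd data (PySem.List.pyRange a b 1) acc =
      (List.findIdx? (fun w => w ≤ 15) (pvScan data (PySem.List.pyRange a b 1) acc)).map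
        (fun (k : Nat) => a + (k : Int) + 1) := by
  by_cases h : b ≤ a
  · rw [PySem.List.pyRange_one_eq_nil h]; rfl
  · have hb : b = a + ((b - a).toNat : Int) := by omega
    rw [hb]; exact pvEnd_findIdx_aux data (b - a).toNat a acc

theorem pvStart_findIdx_aux (data : List (List Int)) (m : Nat) :
    ∀ (a acc : Int),
      pvStart data (PySem.List.pyRange a (a + m) 1) acc =
        (List.findIdx? (fun w => w ≥ 30)
            (pvScan data (PySem.List.pyRange a (a + m) 1) acc)).map
          (fun (k : Nat) => ((a + (k : Int) + 1 : Int),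
            (List.findIdx? (fun w => w ≤ 15)
                ((pvScan data (PySem.List.pyRange a (a + m) 1) acc).drop (k + 1))).map
              (fun (k2 : Nat) => a + (k : Int) + 1 + ((k2 : Int) + 1)))) := by
  induction m with
  | zero =>
    intro a acc
    rw [PySem.List.pyRange_one_eq_nil (by omega : a + ((0:Nat):Int) ≤ a)]
    rfl
  | succ m ih =>
    intro a acc
    rw [PySem.List.pyRange_one_cons (by push_cast; omega : a < a + ((m + 1 : Nat) : Int))]
    have ht : a + ((m + 1 : Nat) : Int) = (a + 1) + (m : Nat) := by push_cast; omega
    rw [ht]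
    simp only [pvStart, pvScan, List.findIdx?_cons, decide_eq_true_eq]
    by_cases h : acc + pvDelta data a ≥ 30
    · rw [if_pos h, if_pos h, pvEnd_findIdx data (a + 1) (a + 1 + (m : Nat)) (acc + pvDelta data a)]
      simp only [Option.map_some, Option.some.injEq, List.drop_succ_cons, List.drop_zero,
        Nat.cast_zero, Prod.mk.injEq]
      constructor
      · omega
      · cases hF : List.findIdx? (fun w => w ≤ 15)
            (pvScan data (PySem.List.pyRange (a + 1) (a + 1 + (m : Nat)) 1)
              (acc + pvDelta data a)) with
        | none => rfl
        | some k2 =>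
          simp only [Option.map_some, Option.some.injEq]
          omega
    · rw [if_neg h, if_neg h, ih (a + 1), Option.map_map]
      cases hF : List.findIdx? (fun w => w ≥ 30)
          (pvScan data (PySem.List.pyRange (a + 1) (a + 1 + (m : Nat)) 1)
            (acc + pvDelta data a)) with
      | none => rfl
      | some k =>
        simp only [Option.map_some, Option.some.injEq, Function.comp_apply,
          List.drop_succ_cons, Prod.mk.injEq]
        constructor
        · push_cast; omega
        · cases hF2 : List.findIdx? (fun w => w ≤ 15)
              ((pvScan data (PySem.List.pyRange (a + 1) (a + 1 + (m : Nat)) 1)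
                (acc + pvDelta data a)).drop (k + 1)) with
          | none => rfl
          | some k2 =>
            simp only [Option.map_some, Option.some.injEq]
            push_cast; omega

theorem pvStart_findIdx (data : List (List Int)) (a b acc : Int) :
    pvStart data (PySem.List.pyRange a b 1) acc =
      (List.findIdx? (fun w => w ≥ 30) (pvScan data (PySem.List.pyRange a b 1) acc)).map
        (fun (k : Nat) => ((a + (k : Int) + 1 : Int),
          (List.findIdx? (fun w => w ≤ 15)
              ((pvScan data (PySem.List.pyRange a b 1) acc).drop (k + 1))).map
            (fun (k2 : Nat) => a + (k : Int) + 1 + ((k2 : Int) + 1)))) := by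
  by_cases h : b ≤ a
  · rw [PySem.List.pyRange_one_eq_nil h]; rfl
  · have hb : b = a + ((b - a).toNat : Int) := by omega
    rw [hb]; exact pvStart_findIdx_aux data (b - a).toNat a acc

theorem rowSum_getD (data : List (List Int)) (i : Int) :
    PySem.List.pyGetD (data.map rowSum) i 0 = sumAt data i := by
  have h0 : (0 : Int) = rowSum [] := rfl
  rw [sumAt, h0, PySem.List.pyGetD_map]

theorem find_pack_spec_main (data : List (List Int)) (start_index : Int) :
    find_pack data start_index = find_pack_alt data start_index := by
  unfold find_pack find_pack_alt
  by_cases h : (data.length : Int) - 7 > start_index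
  · rw [if_pos h, if_neg (by omega)]
    simp only [rowSum_getD]
    simp only [show ∀ i, sumAt data (i + 7) - sumAt data i = pvDelta data i from fun _ => rfl]
    set acc0 := (PySem.List.pyRange 0 7 1).foldl
      (fun a i => a + sumAt data (start_index + i)) 0 with hacc0
    rw [foldl_build]
    set l := PySem.List.pyRange start_index ((data.length : Int) - 7) 1 with hl
    by_cases h0 : acc0 ≥ 30
    · rw [if_pos h0]
      change pvFinish (l.foldl (packStep data) (acc0, true, start_index, none))
        (data.length : Int) = _
      rw [foldl_packStep_true, hl, pvEnd_findIdx data start_index ((data.length : Int) - 7) acc0,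
        ← hl]
      simp only [List.singleton_append, List.findIdx?_cons, decide_eq_true_eq, if_pos h0,
        List.drop_succ_cons, List.drop_zero, Nat.cast_zero]
      cases hF : List.findIdx? (fun w => w ≤ 15) (pvScan data l acc0) with
      | none => simp
      | some k =>
        simp only [Option.map_some, Option.some.injEq, Prod.mk.injEq]
        constructor <;> omega
    · rw [if_neg h0]
      change pvFinish (l.foldl (packStep data) (acc0, false, 0, none))
        (data.length : Int) = _
      rw [foldl_packStep_false, hl, pvStart_findIdx data start_index ((data.length : Int) - 7) acc0,
        ← hl]
      simp only [List.singleton_append, List.findIdx?_cons, decide_eq_true_eq, if_neg h0]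
      cases hF : List.findIdx? (fun w => w ≥ 30) (pvScan data l acc0) with
      | none => rfl
      | some k =>
        simp only [Option.map_some, List.drop_succ_cons]
        cases hF2 : List.findIdx? (fun w => w ≤ 15) ((pvScan data l acc0).drop (k + 1)) with
        | none =>
          simp only [Option.map_none, Option.some.injEq, Prod.mk.injEq]
          exact ⟨by push_cast; omega, trivial⟩
        | some k2 =>
          simp only [Option.map_some, Option.some.injEq, Prod.mk.injEq]
          constructor <;> push_cast <;> omega
  · rw [if_neg h, if_pos (by omega)]

-- ===== VERDICT (by name: the statement is the Claim_ definition above) =====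
theorem find_pack_spec : Claim_equal_find_pack := by
  intro data start_index _ _
  unfold Spec_find_pack
  exact find_pack_spec_main data start_index
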